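-- pv_equiv track=rewrite | github.com/danielrs975/The_Balance_Problem | balance.py | balance_number
-- ===== SOURCE A (Python) =====
-- sum_base = {
--     'T+T': 'T1',
--     'T+0': 'T',
--     'T+1': '0',
--     '0+T': 'T',
--     '0+0': '0',
--     '0+1': '1',
--     '1+T': '0',
--     '1+0': '1',
--     '1+1': '1T'
-- }
--
-- def result_sum_two_digits(d1, d2):
--     """
--     This function return the sum representation of two
--     digits
--         --d1, d2: Digits to sum represent it as strings
--     In here we use the sum base to transform this kind of expression: d1+d2 to a single
--     expression that is the result. For example, if d1 = 0 and d2 = 0 then th result is the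
--     sum_base["0+0"] = '0'. All posible combinations of the sum d1+d2 are in the sum_base dictionnary.
--     """
--     return sum_base["{}+{}".format(d1, d2)]
--
-- def ternary_sum(a, b):
--     """
--     This function is going to sum to number that are
--     balance ternaries and give another balance ternary
--         a, b: Strings that represent balance ternaries number to sum
--     """
--     result = ""
--     numbers = [a, b]
--     # Sort the numbers by length of theirs string representations
--     numbers.sort(key=len, reverse=True)
--     numbers[1] = "0"*(len(numbers[0]) - len(numbers[1])) + numbers[1]
--     # This two line reverse the numbers to properly sum them from right to left
--     #    <--
--     #  0100 +
--     #  10T0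
--     # -----
--     #  11T0
--     # We use in here the sum_base to obtain for each sum of digits
--     # 0+0, 0+T, 1+0, 0+1 the results.
--     numbers[0] = numbers[0][::-1]
--     numbers[1] = numbers[1][::-1]
--     carry = ""
--     for index, val in enumerate(numbers[0]):
--         digit_result = result_sum_two_digits(val, numbers[1][index])
--         if (len(carry) != 0):
--             digit_result = result_sum_two_digits(val, carry)
--             carry = ""
--
--         # In here we see if we get some carry like in the base 10 sum
--         # That occurs with to results
--         #   - T+T ----> T1
--         #   - 1+1 ----> 1T
--         if (len(digit_result) == 2):
--             carry = digit_result[0]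
--             digit_result = digit_result[1]
--         result = digit_result + result
--
--     return carry + result
--
-- def balance_number(number):
--     """
--     This function balance an number in
--     a base 3 representation
--         -- number: String. receives a base 3 unbalanced number
--     """
--     result = ""
--     sums_to_do = []
--     count = 0
--     # This loops transform all the 2's in 1T's
--     # This is to know the sums to do to original number
--     for digit in number:
--         if (digit == "2"):
--             aux = "1T" + ("0"*(len(number) - count - 1))
--             sums_to_do.append(aux)
--             result += "0"
--         else:
--             result += digit
--         count += 1
--
--     for number in sums_to_do:
--         result = ternary_sum(result, number)
--     return result
-- ===== SOURCE B (Python) =====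
-- def balance_number(number):
--     """Single right-to-left carry pass producing balanced-ternary digits directly."""
--     if '2' not in number:
--         return number  # nothing to balance
--     out = []
--     carry = 0
--     for ch in reversed(number):
--         v = int(ch) + carry
--         if v == 2:
--             out.append('T')
--             carry = 1
--         elif v == 3:
--             out.append('0')
--             carry = 1
--         else:
--             out.append(str(v))
--             carry = 0
--     if carry:
--         out.append('1')
--     return ''.join(reversed(out))
-- ===== Notes on version B (the rewrite author's own statement) =====
-- stated objective: faster
-- what changed: Replaces the two-phase scheme (rewrite each '2' as a padded '1T...0' correction string, then repeatedly run a digit-by-digit string addition over the whole number for every '2') by a single right-to-left pass that adds the carry into each base-3 digit and emits the balanced digit directly; inputs without a '2' are returned unchanged, as A does. Pre_ excludes strings that contain a '2' together with a character outside '012': on those A raises KeyError, except when the foreign characters are all 'T' where A returns an accidental mixed-base value; B raises ValueError on all of them.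
-- outside the precondition, e.g. on balance_number('2T'): A returns '1TT', B raises ValueError; on balance_number('2x'): A raises KeyError, B raises ValueError
import Mathlib
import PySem

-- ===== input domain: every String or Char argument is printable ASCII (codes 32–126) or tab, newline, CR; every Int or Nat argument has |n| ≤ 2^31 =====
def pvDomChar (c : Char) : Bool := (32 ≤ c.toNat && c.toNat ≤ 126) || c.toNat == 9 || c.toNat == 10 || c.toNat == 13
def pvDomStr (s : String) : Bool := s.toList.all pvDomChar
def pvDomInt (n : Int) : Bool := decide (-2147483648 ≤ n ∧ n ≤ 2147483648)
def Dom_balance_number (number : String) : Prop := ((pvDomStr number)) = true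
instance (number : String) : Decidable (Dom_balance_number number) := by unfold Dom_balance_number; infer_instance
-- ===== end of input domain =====

-- B replaces A's repeated full-string balanced-ternary additions (one per '2') by a single
-- right-to-left carry pass (objective: faster, asymptotic).

-- ===== PORT A =====

-- the sum_base dictionary
def sumBase : PySem.Dict String String :=
  PySem.Dict.ofList [("T+T", "T1"), ("T+0", "T"), ("T+1", "0"),
                     ("0+T", "T"), ("0+0", "0"), ("0+1", "1"),
                     ("1+T", "0"), ("1+0", "1"), ("1+1", "1T")]

-- result_sum_two_digits; "{}+{}".format(d1, d2) on the 1-char strings used here.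
-- Missing keys (KeyError in Python) are outside Pre_; getD "" is the total form.
def resultSumTwoDigits (d1 d2 : List Char) : List Char :=
  (PySem.Dict.getD sumBase (String.ofList (d1 ++ '+' :: d2)) "").toList

-- the `for index, val in enumerate(numbers[0])` loop of ternary_sum, recursing over the two
-- (equal-length) reversed digit lists in parallel; state: carry, result (both Python strings).
def tsLoop : List Char → List Char → List Char → List Char → List Char
  | [], _, carry, result => carry ++ result
  | _ :: _, [], carry, result => carry ++ result  -- unreachable: the lists have equal length
  | v :: xs, y :: ys, carry, result =>
      let dr0 := resultSumTwoDigits [v] [y]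
      let dr1 := if carry.length ≠ 0 then resultSumTwoDigits [v] carry else dr0
      let carry1 := if carry.length ≠ 0 then ([] : List Char) else carry
      let dr2 := if dr1.length = 2 then dr1.drop 1 else dr1
      let carry2 := if dr1.length = 2 then dr1.take 1 else carry1
      tsLoop xs ys carry2 (dr2 ++ result)

-- ternary_sum on digit lists
def ternarySum (a b : List Char) : List Char :=
  -- numbers.sort(key=len, reverse=True) on a 2-list: stable, so b comes first iff strictly longer
  let n0 := if b.length > a.length then b else a
  let n1 := if b.length > a.length then a else b
  let n1 := List.replicate (n0.length - n1.length) '0' ++ n1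
  tsLoop n0.reverse n1.reverse [] []

-- the first loop of balance_number: builds result and sums_to_do, with counter `count`
def bnLoop (n : Nat) : List Char → Nat → List Char → List (List Char) → List Char × List (List Char)
  | [], _, result, sums => (result, sums)
  | d :: rest, count, result, sums =>
      if d = '2' then
        bnLoop n rest (count + 1) (result ++ ['0'])
          (sums ++ [['1', 'T'] ++ List.replicate (n - count - 1) '0'])
      else
        bnLoop n rest (count + 1) (result ++ [d]) sums

def balance_number (number : String) : String :=
  let cs := number.toList
  let rs := bnLoop cs.length cs 0 [] []
  String.ofList (rs.2.foldl (fun r s => ternarySum r s) rs.1)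

-- ===== PORT B =====

-- the `for ch in reversed(number)` loop of Source B; input is the reversed digit list, output is
-- the `out` list (chunks concatenated) in append order, with the final carry '1' appended.
def altLoop : List Char → Int → List Char
  | [], carry => if carry ≠ 0 then ['1'] else []
  | c :: rest, carry =>
      let v := (PySem.Int.ofStr? (String.ofList [c])).getD 0 + carry
      if v = 2 then 'T' :: altLoop rest 1
      else if v = 3 then '0' :: altLoop rest 1
      else (PySem.Int.toStr v).toList ++ altLoop rest 0

def balance_number_alt (number : String) : String :=
  -- `'2' not in number`: Python's 1-character substring test, exact as char membership
  if '2' ∈ number.toList then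
    String.ofList (altLoop number.toList.reverse 0).reverse
  else number

-- ===== PRECONDITION & SPEC =====
-- Pre_ excludes strings that contain a '2' together with a character outside '012': on those A
-- raises KeyError, except when the foreign characters are all 'T' where A returns an accidental
-- mixed-base value; B raises ValueError on all of them.
def Pre_balance_number (number : String) : Prop :=
  (!number.toList.contains '2' || number.toList.all (fun c => c = '0' || c = '1' || c = '2')) = true
instance (number : String) : Decidable (Pre_balance_number number) := by
  unfold Pre_balance_number; infer_instance

def pvWitness_balance_number : String := "120210"

def Spec_balance_number (number : String) (out : String) : Prop := out = balance_number_alt number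
instance (number : String) (out : String) : Decidable (Spec_balance_number number out) := by
  unfold Spec_balance_number; infer_instance

-- ===== CLAIM (what is proved, stated in full; the proofs are below) =====
def Claim_equal_balance_number : Prop :=
  ∀ (number : String), Dom_balance_number number → Pre_balance_number number →
    Spec_balance_number number (balance_number number)

-- ===== LEMMAS AND PROOFS =====

def Bal (c : Char) : Prop := c = 'T' ∨ c = '0' ∨ c = '1'

def incR : List Char → List Char
  | [] => ['1']
  | c :: r => if c = '1' then 'T' :: incR r else (if c = 'T' then '0' else '1') :: r

theorem rs2d_right0 (c : Char) (h : Bal c) : resultSumTwoDigits [c] ['0'] = [c] := by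
  rcases h with h|h|h <;> subst h <;> decide
theorem rs2d_left0 (c : Char) (h : Bal c) : resultSumTwoDigits ['0'] [c] = [c] := by
  rcases h with h|h|h <;> subst h <;> decide

theorem tsLoop_acc (u : List Char) : ∀ (w carry acc : List Char),
    tsLoop u w carry acc = tsLoop u w carry [] ++ acc := by
  induction u with
  | nil => intro w carry acc; simp [tsLoop]
  | cons v xs ih =>
      intro w carry acc
      cases w with
      | nil => simp [tsLoop]
      | cons y ys =>
          simp only [tsLoop]
          rw [ih, ih _ _ (_ ++ [])]
          simp

theorem tsLoop_zeros (l : List Char) : ∀ (acc : List Char), (∀ c ∈ l, Bal c) →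
    tsLoop l (List.replicate l.length '0') [] acc = l.reverse ++ acc := by
  induction l with
  | nil => intro acc _; simp [tsLoop]
  | cons v xs ih =>
      intro acc hb
      have hv : Bal v := hb v (by simp)
      simp only [List.length_cons, List.replicate_succ, tsLoop,
        rs2d_right0 v hv]
      norm_num
      exact ih (v :: acc) (fun c hc => hb c (by simp [hc]))


theorem rs2d_T1 : resultSumTwoDigits ['T'] ['1'] = ['0'] := by decide
theorem rs2d_01 : resultSumTwoDigits ['0'] ['1'] = ['1'] := by decide
theorem rs2d_11 : resultSumTwoDigits ['1'] ['1'] = ['1', 'T'] := by decide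
theorem rs2d_0T : resultSumTwoDigits ['0'] ['T'] = ['T'] := by decide

theorem tsLoop_carry (l : List Char) : ∀ (acc : List Char), (∀ c ∈ l, Bal c) →
    tsLoop l (List.replicate l.length '0') ['1'] acc = (incR l).reverse ++ acc := by
  induction l with
  | nil => intro acc _; simp [tsLoop, incR]
  | cons v xs ih =>
      intro acc hb
      have hv : Bal v := hb v (by simp)
      have hxs : ∀ c ∈ xs, Bal c := fun c hc => hb c (by simp [hc])
      rcases hv with h|h|h <;> subst h
      · simp only [List.length_cons, List.replicate_succ, tsLoop, incR]
        simp only [rs2d_T1]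
        norm_num
        rw [tsLoop_zeros xs _ hxs]
        simp
      · simp only [List.length_cons, List.replicate_succ, tsLoop, incR]
        simp only [rs2d_01]
        norm_num
        rw [tsLoop_zeros xs _ hxs]
        simp
      · simp only [List.length_cons, List.replicate_succ, tsLoop, incR]
        simp only [rs2d_11]
        norm_num
        rw [ih _ hxs]

theorem ternarySum_append_last (x s : List Char) (c : Char)
    (hc : c = '0' ∨ c = '1' ∨ c = 'T') :
    ternarySum (x ++ [c]) (s ++ ['0']) = ternarySum x s ++ [c] := by
  have hbc : Bal c := by rcases hc with h|h|h <;> subst h <;> simp [Bal]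
  by_cases hl : (s ++ ['0']).length > (x ++ [c]).length
  · have hl' : s.length > x.length := by simpa using hl
    simp only [ternarySum, if_pos hl, if_pos hl']
    have hp : (s ++ ['0']).length - (x ++ [c]).length = s.length - x.length := by simp
    rw [hp]
    have hsplit : List.replicate (s.length - x.length) '0' ++ (x ++ [c]) =
        (List.replicate (s.length - x.length) '0' ++ x) ++ [c] := by simp
    rw [hsplit]
    simp only [List.reverse_append, List.reverse_cons, List.reverse_nil, List.nil_append,
      List.singleton_append, List.cons_append]
    simp only [tsLoop, rs2d_left0 c hbc]
    norm_num
    rw [tsLoop_acc]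
  · have hl' : ¬ s.length > x.length := by simpa using hl
    simp only [ternarySum, if_neg hl, if_neg hl']
    have hp : (x ++ [c]).length - (s ++ ['0']).length = x.length - s.length := by simp
    rw [hp]
    have hsplit : List.replicate (x.length - s.length) '0' ++ (s ++ ['0']) =
        (List.replicate (x.length - s.length) '0' ++ s) ++ ['0'] := by simp
    rw [hsplit]
    simp only [List.reverse_append, List.reverse_cons, List.reverse_nil, List.nil_append,
      List.singleton_append, List.cons_append]
    simp only [tsLoop, rs2d_right0 c hbc]
    norm_num
    rw [tsLoop_acc]

theorem tsLoop_step0T (l w acc : List Char) :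
    tsLoop ('0' :: l) ('T' :: w) [] acc = tsLoop l w [] ('T' :: acc) := by
  simp only [tsLoop, rs2d_0T]
  norm_num

theorem tsLoop_corr (v : Char) (rest : List Char) (hb : ∀ c ∈ v :: rest, Bal c) (acc : List Char) :
    tsLoop (v :: rest) ('1' :: List.replicate rest.length '0') [] acc =
      (incR (v :: rest)).reverse ++ acc := by
  have hv : Bal v := hb v (by simp)
  have hrest : ∀ c ∈ rest, Bal c := fun c hc => hb c (by simp [hc])
  rcases hv with h|h|h <;> subst h
  · simp only [tsLoop, incR, rs2d_T1]
    norm_num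
    rw [tsLoop_zeros rest _ hrest]
    simp
  · simp only [tsLoop, incR, rs2d_01]
    norm_num
    rw [tsLoop_zeros rest _ hrest]
    simp
  · simp only [tsLoop, incR, rs2d_11]
    norm_num
    rw [tsLoop_carry rest _ hrest]

theorem ternarySum_corr (y : List Char) (hb : ∀ c ∈ y, Bal c) :
    ternarySum (y ++ ['0']) ['1', 'T'] = (incR y.reverse).reverse ++ ['T'] := by
  cases hy : y with
  | nil => decide
  | cons w ys =>
      have hne : ¬ (['1', 'T'] : List Char).length > (y ++ ['0']).length := by
        subst hy; simp
      rw [← hy]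
      simp only [ternarySum, if_neg hne]
      have hp : (y ++ ['0']).length - (['1', 'T'] : List Char).length = ys.length := by
        subst hy; simp
      rw [hp]
      have hrev1 : (y ++ ['0']).reverse = '0' :: y.reverse := by simp
      have hrev2 : (List.replicate ys.length '0' ++ ['1', 'T']).reverse =
          'T' :: '1' :: List.replicate ys.length '0' := by
        simp [List.reverse_replicate]
      rw [hrev1, hrev2]
      obtain ⟨v, rest, hvr⟩ : ∃ v rest, y.reverse = v :: rest := by
        subst hy
        rcases List.exists_cons_of_ne_nil (l := (w :: ys).reverse) (by simp) with ⟨v, rest, hv⟩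
        exact ⟨v, rest, hv⟩
      have hlenr : rest.length = ys.length := by
        have := congrArg List.length hvr
        subst hy; simp at this; omega
      rw [hvr, ← hlenr]
      rw [tsLoop_step0T]
      have hbrev : ∀ c ∈ v :: rest, Bal c := by
        rw [← hvr]
        intro c hc
        exact hb c (by simpa using hc)
      rw [tsLoop_corr v rest hbrev ['T']]


theorem ofs_0 : (PySem.Int.ofStr? (String.ofList ['0'])).getD 0 = 0 := by decide
theorem ofs_1 : (PySem.Int.ofStr? (String.ofList ['1'])).getD 0 = 1 := by decide
theorem ofs_2 : (PySem.Int.ofStr? (String.ofList ['2'])).getD 0 = 2 := by decide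
theorem ofs_0' : (PySem.Int.ofStr? "0").getD 0 = 0 := by decide
theorem ofs_1' : (PySem.Int.ofStr? "1").getD 0 = 1 := by decide
theorem ofs_2' : (PySem.Int.ofStr? "2").getD 0 = 2 := by decide
theorem tc_0 : PySem.Int.toChars 0 = ['0'] := by decide
theorem tc_1 : PySem.Int.toChars 1 = ['1'] := by decide
theorem ts_0 : (PySem.Int.toStr 0).toList = ['0'] := by decide
theorem ts_1 : (PySem.Int.toStr 1).toList = ['1'] := by decide

theorem altLoop_bal (l : List Char) : ∀ (carry : Int),
    (∀ c ∈ l, c = '0' ∨ c = '1' ∨ c = '2') → (carry = 0 ∨ carry = 1) →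
    ∀ c ∈ altLoop l carry, Bal c := by
  induction l with
  | nil =>
      intro carry _ _ c hc
      simp only [altLoop] at hc
      split at hc <;> simp at hc
      subst hc; simp [Bal]
  | cons d rest ih =>
      intro carry h hcar
      have hrest : ∀ c ∈ rest, c = '0' ∨ c = '1' ∨ c = '2' := fun c hc => h c (by simp [hc])
      have step : ∀ (ch : List Char) (carry' : Int), (∀ c ∈ ch, Bal c) →
          (carry' = 0 ∨ carry' = 1) → ∀ c ∈ ch ++ altLoop rest carry', Bal c := by
        intro ch carry' hch hcar' c hc
        rcases List.mem_append.1 hc with hc | hc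
        · exact hch c hc
        · exact ih carry' hrest hcar' c hc
      have hd : d = '0' ∨ d = '1' ∨ d = '2' := h d (by simp)
      rcases hd with h0|h0|h0 <;> subst h0 <;> rcases hcar with hc1|hc1 <;> subst hc1 <;>
        · simp only [altLoop, ofs_0, ofs_1, ofs_2]
          norm_num [ts_0, ts_1]
          first
          | (refine ⟨by simp [Bal], fun c hc => ih _ hrest (by norm_num) c hc⟩)
          | (intro c hc
             rcases hc with hc | hc
             · first
               | (subst hc; simp [Bal])
               | (simp only [tc_0, tc_1, List.mem_singleton] at hc; subst hc; simp [Bal])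
             · exact ih _ hrest (by norm_num) c hc)

theorem altLoop_carry (l : List Char) (h : ∀ c ∈ l, c = '0' ∨ c = '1' ∨ c = '2') :
    altLoop l 1 = incR (altLoop l 0) := by
  induction l with
  | nil => simp [altLoop, incR]
  | cons d rest ih =>
      have hd : d = '0' ∨ d = '1' ∨ d = '2' := h d (by simp)
      have hrest : ∀ c ∈ rest, c = '0' ∨ c = '1' ∨ c = '2' := fun c hc => h c (by simp [hc])
      rcases hd with h0|h0|h0 <;> subst h0 <;>
        simp [altLoop, incR, ih hrest, ofs_0, ofs_1, ofs_2, ofs_0', ofs_1', ofs_2', tc_0, tc_1]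

def r0 (cs : List Char) : List Char := cs.map (fun c => if c = '2' then '0' else c)

def auxes (n : Nat) : List Char → Nat → List (List Char)
  | [], _ => []
  | d :: rest, count =>
      (if d = '2' then [['1', 'T'] ++ List.replicate (n - count - 1) '0'] else []) ++
        auxes n rest (count + 1)

theorem bnLoop_eq (n : Nat) (cs : List Char) : ∀ (count : Nat) (r : List Char) (s : List (List Char)),
    bnLoop n cs count r s = (r ++ r0 cs, s ++ auxes n cs count) := by
  induction cs with
  | nil => intro count r s; simp [bnLoop, r0, auxes]
  | cons d rest ih =>
      intro count r s
      by_cases h : d = '2' <;> simp [bnLoop, r0, auxes, h, ih]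

theorem auxes_last (m : List Char) (d : Char) : ∀ (count : Nat),
    auxes (count + m.length + 1) (m ++ [d]) count =
      (auxes (count + m.length) m count).map (· ++ ['0']) ++
        (if d = '2' then [['1', 'T']] else []) := by
  induction m with
  | nil => intro count; by_cases h : d = '2' <;> simp [auxes, h]
  | cons c m ih =>
      intro count
      simp only [List.cons_append, auxes, List.length_cons]
      have e1 : count + (m.length + 1) + 1 = (count + 1) + m.length + 1 := by omega
      have e2 : count + (m.length + 1) = (count + 1) + m.length := by omega
      have hrep : count + (m.length + 1) + 1 - count - 1 = m.length + 1 := by omega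
      by_cases h : c = '2'
      · simp only [h, ite_true]
        rw [hrep, e1, e2, ih (count + 1), List.replicate_succ']
        have hrep2 : count + 1 + m.length - count - 1 = m.length := by omega
        rw [hrep2]
        simp
      · simp only [h, ite_false, List.nil_append]
        rw [e1, e2, ih (count + 1)]


theorem foldl_ternarySum_pad (ss : List (List Char)) : ∀ (x : List Char) (c : Char),
    (c = '0' ∨ c = '1' ∨ c = 'T') →
    List.foldl ternarySum (x ++ [c]) (ss.map (· ++ ['0'])) =
      List.foldl ternarySum x ss ++ [c] := by
  induction ss with
  | nil => intro x c _; simp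
  | cons s ss ih =>
      intro x c hc
      simp only [List.map_cons, List.foldl_cons, ternarySum_append_last x s c hc]
      exact ih _ c hc


theorem main_eq (cs : List Char) (h : ∀ c ∈ cs, c = '0' ∨ c = '1' ∨ c = '2') :
    List.foldl (fun r s => ternarySum r s) (r0 cs) (auxes cs.length cs 0) =
      (altLoop cs.reverse 0).reverse := by
  induction cs using List.reverseRecOn with
  | nil => simp [r0, auxes, altLoop]
  | append_singleton m d ih =>
      have hm : ∀ c ∈ m, c = '0' ∨ c = '1' ∨ c = '2' := fun c hc => h c (by simp [hc])
      have hmr : ∀ c ∈ m.reverse, c = '0' ∨ c = '1' ∨ c = '2' := by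
        intro c hc; exact hm c (List.mem_reverse.1 hc)
      have hd : d = '0' ∨ d = '1' ∨ d = '2' := h d (by simp)
      have hlen : (m ++ [d]).length = 0 + m.length + 1 := by simp
      rw [hlen, auxes_last m d 0]
      have hz : (0 : Nat) + m.length = m.length := by omega
      rw [hz]
      have hr : r0 (m ++ [d]) = r0 m ++ [if d = '2' then '0' else d] := by simp [r0]
      rw [hr, List.foldl_append]
      have hcond : (if d = '2' then '0' else d) = '0' ∨ (if d = '2' then '0' else d) = '1' ∨
          (if d = '2' then '0' else d) = 'T' := by
        rcases hd with h0|h0|h0 <;> subst h0 <;> simp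
      rw [foldl_ternarySum_pad (auxes m.length m 0) (r0 m) _ hcond, ih hm]
      have hrev : (m ++ [d]).reverse = d :: m.reverse := by simp
      rw [hrev]
      rcases hd with h0|h0|h0 <;> subst h0
      · simp [altLoop, ofs_0, ofs_0', tc_0, tc_1]
      · simp [altLoop, ofs_1, ofs_1', tc_1]
      · simp only [ite_true, List.foldl_cons, List.foldl_nil]
        have hbal : ∀ c ∈ (altLoop m.reverse 0).reverse, Bal c := by
          intro c hc
          exact altLoop_bal m.reverse 0 hmr (Or.inl rfl) c (List.mem_reverse.1 hc)
        rw [ternarySum_corr _ hbal, List.reverse_reverse, ← altLoop_carry m.reverse hmr]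
        simp [altLoop, ofs_2, ofs_2']

-- when the input has no '2', A's first loop copies it and schedules no sums
theorem r0_no2 (cs : List Char) (h : '2' ∉ cs) : r0 cs = cs := by
  unfold r0
  have : ∀ c ∈ cs, (if c = '2' then '0' else c) = c := by
    intro c hc
    have : c ≠ '2' := fun he => h (he ▸ hc)
    simp [this]
  rw [List.map_congr_left this]; simp

theorem auxes_no2 (n : Nat) (cs : List Char) : ∀ (count : Nat), '2' ∉ cs →
    auxes n cs count = [] := by
  induction cs with
  | nil => intro count _; rfl
  | cons d rest ih =>
      intro count h
      have hd : d ≠ '2' := fun he => h (he ▸ List.mem_cons_self)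
      simp only [auxes, hd, ite_false, List.nil_append]
      exact ih (count + 1) (fun hc => h (List.mem_cons_of_mem _ hc))

-- ===== VERDICT (by name: the statement is the Claim_ definition above) =====
theorem balance_number_spec : Claim_equal_balance_number := by
  intro number _ hpre
  show balance_number number = balance_number_alt number
  by_cases hmem : '2' ∈ number.toList
  · have hp : ∀ c ∈ number.toList, c = '0' ∨ c = '1' ∨ c = '2' := by
      intro c hc
      unfold Pre_balance_number at hpre
      simp only [Bool.or_eq_true, Bool.not_eq_eq_eq_not, Bool.not_true, List.contains_eq_mem,
        decide_eq_false_iff_not, List.all_eq_true, Bool.or_eq_true, decide_eq_true_eq] at hpre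
      rcases hpre with hpre | hpre
      · exact absurd hmem (by simpa using hpre)
      · have := hpre c hc; tauto
    simp only [balance_number, balance_number_alt, if_pos hmem, bnLoop_eq, List.nil_append]
    exact congrArg String.ofList (main_eq number.toList hp)
  · simp only [balance_number, balance_number_alt, if_neg hmem, bnLoop_eq, List.nil_append,
      r0_no2 number.toList hmem, auxes_no2 number.toList.length number.toList 0 hmem,
      List.foldl_nil]
    exact String.ofList_toList
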